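-- pv_equiv track=rewrite | github.com/suiyingliuxin/Video_clip | main_auto_merge.py | process_vision_scenes
-- ===== SOURCE A (Python) =====
-- def has_intersection(interval1, interval2):
--     """
--     判断两个区间是否相交
--     interval1: (start1, end1)
--     interval2: (start2, end2)
--     返回: True 如果相交, False 如果不相交
--     """
--     start1, end1 = interval1
--     start2, end2 = interval2
--     # 两个区间相交的条件: start1 <= end2 and start2 <= end1
--     return start1 <= end2 and start2 <= end1
--
-- def process_vision_scenes(vision_scenes, audio_frames):
--     """
--     处理视觉检测区间
--     - 如果与音频区间相交,进入待审核
--     - 否则直接保留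
--     """
--     check_list=[]
--     reserve_list=[]
--     for vision_interval in vision_scenes:
--         # 检查是否与任何音频区间相交
--         has_audio_intersection = False
--
--         for audio_interval in audio_frames:
--             if has_intersection(vision_interval, audio_interval):
--                 has_audio_intersection = True
--                 break
--
--         if has_audio_intersection:
--             # 进入待审核
--             check_list.append(vision_interval)
--         else:
--             # 直接保留
--             reserve_list.append(vision_interval)
--     return check_list, reserve_list
-- ===== SOURCE B (Python) =====
-- def process_vision_scenes(vision_scenes, audio_frames):
--     # Sort audio intervals by start; precompute prefix maxima of ends; then each
--     # vision interval is classified with one binary search: O((V+A) log A).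
--     audio_sorted = sorted(audio_frames, key=lambda p: p[0])
--     starts = [p[0] for p in audio_sorted]
--     maxends = []
--     cur = None
--     for p in audio_sorted:
--         e = p[1]
--         cur = e if cur is None or e > cur else cur
--         maxends.append(cur)
--     n = len(starts)
--     check_list = []
--     reserve_list = []
--     for v in vision_scenes:
--         # k = number of audio starts <= v[1]  (hand-written bisect_right)
--         lo, hi = 0, n
--         while lo < hi:
--             mid = (lo + hi) // 2
--             if starts[mid] <= v[1]:
--                 lo = mid + 1
--             else:
--                 hi = mid
--         k = lo
--         if k > 0 and v[0] <= maxends[k - 1]: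
--             check_list.append(v)
--         else:
--             reserve_list.append(v)
--     return check_list, reserve_list
-- ===== Notes on version B (the rewrite author's own statement) =====
-- stated objective: faster
-- what changed: Replaces the nested scan over all audio intervals per vision interval by sorting audio by start with prefix maxima of ends, classifying each vision interval with one binary search.
import Mathlib
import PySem

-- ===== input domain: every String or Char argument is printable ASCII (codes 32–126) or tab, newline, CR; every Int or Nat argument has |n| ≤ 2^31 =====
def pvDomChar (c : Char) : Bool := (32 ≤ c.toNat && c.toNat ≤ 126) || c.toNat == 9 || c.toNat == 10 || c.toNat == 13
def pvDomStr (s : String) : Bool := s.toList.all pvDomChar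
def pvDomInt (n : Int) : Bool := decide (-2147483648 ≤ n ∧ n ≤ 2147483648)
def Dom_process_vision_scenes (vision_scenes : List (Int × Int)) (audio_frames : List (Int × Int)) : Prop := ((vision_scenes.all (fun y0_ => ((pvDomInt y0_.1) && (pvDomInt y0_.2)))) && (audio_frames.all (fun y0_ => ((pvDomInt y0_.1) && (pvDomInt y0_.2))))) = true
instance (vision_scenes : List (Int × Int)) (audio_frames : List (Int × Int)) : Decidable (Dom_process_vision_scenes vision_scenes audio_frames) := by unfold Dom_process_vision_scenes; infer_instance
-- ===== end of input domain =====

-- B replaces A's per-vision scan of all audio intervals by sort + prefix maxima + one binary search per vision interval (asymptotically faster; measured).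

-- ===== PORT A =====
def has_intersection (interval1 interval2 : Int × Int) : Bool :=
  decide (interval1.1 ≤ interval2.2) && decide (interval2.1 ≤ interval1.2)

-- A's inner `for … if …: …; break` loop
def pvAnyIntersect (v : Int × Int) : List (Int × Int) → Bool
  | [] => false
  | a :: rest => if has_intersection v a then true else pvAnyIntersect v rest

def process_vision_scenes (vision_scenes : List (Int × Int)) (audio_frames : List (Int × Int)) : (List (Int × Int)) × (List (Int × Int)) :=
  vision_scenes.foldl
    (fun acc v =>
      if pvAnyIntersect v audio_frames then (acc.1 ++ [v], acc.2) else (acc.1, acc.2 ++ [v]))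
    ([], [])

-- ===== PORT B =====
-- hand-written bisect_right of Source B: number of elements of `starts` ≤ x (while lo < hi …)
def pvCountLE (starts : List Int) (x : Int) (lo hi : Nat) : Nat :=
  if _h : lo < hi then
    let mid := (lo + hi) / 2
    if starts.getD mid 0 ≤ x then pvCountLE starts x (mid + 1) hi
    else pvCountLE starts x lo mid
  else lo
termination_by hi - lo
decreasing_by all_goals omega

def process_vision_scenes_alt (vision_scenes : List (Int × Int)) (audio_frames : List (Int × Int)) : (List (Int × Int)) × (List (Int × Int)) :=
  let audio_sorted := PySem.List.sorted audio_frames (fun p => p.1)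
  let starts := audio_sorted.map (fun p => p.1)
  let maxends := (audio_sorted.foldl
      (fun (st : Option Int × List Int) p =>
        let cur : Int := match st.1 with
          | none => p.2
          | some c => if p.2 > c then p.2 else c
        (some cur, st.2 ++ [cur]))
      (none, [])).2
  let n := starts.length
  vision_scenes.foldl
    (fun acc v =>
      let k := pvCountLE starts v.2 0 n
      if k > 0 && decide (v.1 ≤ maxends.getD (k - 1) 0) then (acc.1 ++ [v], acc.2)
      else (acc.1, acc.2 ++ [v]))
    ([], [])

-- ===== PRECONDITION & SPEC =====
def Spec_process_vision_scenes (vision_scenes : List (Int × Int)) (audio_frames : List (Int × Int)) (out : (List (Int × Int)) × (List (Int × Int))) : Prop := out = process_vision_scenes_alt vision_scenes audio_frames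
instance (vision_scenes : List (Int × Int)) (audio_frames : List (Int × Int)) (out : (List (Int × Int)) × (List (Int × Int))) : Decidable (Spec_process_vision_scenes vision_scenes audio_frames out) := by unfold Spec_process_vision_scenes; infer_instance

-- ===== CLAIM (what is proved, stated in full; the proofs are below) =====
def Claim_equal_process_vision_scenes : Prop := ∀ (vision_scenes : List (Int × Int)) (audio_frames : List (Int × Int)), Dom_process_vision_scenes vision_scenes audio_frames → Spec_process_vision_scenes vision_scenes audio_frames (process_vision_scenes vision_scenes audio_frames)

-- ===== LEMMAS AND PROOFS =====

-- A's inner loop decides ∃ intersecting audio interval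
theorem pvAnyIntersect_eq_true_iff (v : Int × Int) (l : List (Int × Int)) :
    pvAnyIntersect v l = true ↔ ∃ a ∈ l, v.1 ≤ a.2 ∧ a.1 ≤ v.2 := by
  induction l with
  | nil => simp [pvAnyIntersect]
  | cons a rest ih =>
    simp only [pvAnyIntersect, has_intersection]
    by_cases h1 : v.1 ≤ a.2 <;> by_cases h2 : a.1 ≤ v.2 <;>
      simp [h1, h2, ih]

-- specification of the hand-written binary search, given the invariants
theorem pvCountLE_spec (s : List Int) (x : Int)
    (mono : ∀ i j : Nat, i ≤ j → j < s.length → s.getD i 0 ≤ s.getD j 0) :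
    ∀ fuel lo hi : Nat, hi - lo ≤ fuel → lo ≤ hi → hi ≤ s.length →
    (∀ j : Nat, j < lo → s.getD j 0 ≤ x) →
    (∀ j : Nat, hi ≤ j → j < s.length → x < s.getD j 0) →
    lo ≤ pvCountLE s x lo hi ∧ pvCountLE s x lo hi ≤ hi ∧
    (∀ j : Nat, j < pvCountLE s x lo hi → s.getD j 0 ≤ x) ∧
    (∀ j : Nat, pvCountLE s x lo hi ≤ j → j < s.length → x < s.getD j 0) := by
  intro fuel
  induction fuel with
  | zero =>
    intro lo hi hf hlh hhi hlo hhiP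
    have hlh' : lo = hi := by omega
    subst hlh'
    rw [pvCountLE]
    simp only [lt_irrefl, dite_false]
    exact ⟨le_refl _, le_refl _, hlo, hhiP⟩
  | succ m ih =>
    intro lo hi hf hlh hhi hlo hhiP
    rw [pvCountLE]
    by_cases h : lo < hi
    · simp only [h, dite_true]
      have hmidlt : (lo + hi) / 2 < hi := by omega
      have hmidge : lo ≤ (lo + hi) / 2 := by omega
      by_cases hc : s.getD ((lo + hi) / 2) 0 ≤ x
      · simp only [hc, if_true]
        have hres := ih ((lo + hi) / 2 + 1) hi (by omega) (by omega) hhi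
          (fun j hj => by
            by_cases hj' : j < lo
            · exact hlo j hj'
            · exact le_trans (mono j ((lo + hi) / 2) (by omega) (by omega)) hc)
          hhiP
        exact ⟨by omega, hres.2.1, hres.2.2.1, hres.2.2.2⟩
      · simp only [hc, if_false]
        push Not at hc
        have hres := ih lo ((lo + hi) / 2) (by omega) (by omega) (by omega) hlo
          (fun j hj hjl => lt_of_lt_of_le hc (mono ((lo + hi) / 2) j hj hjl))
        exact ⟨hres.1, by omega, hres.2.2.1, hres.2.2.2⟩
    · simp only [h, dite_false]
      exact ⟨le_refl _, (by omega), hlo, fun j hj hjl => hhiP j (by omega) hjl⟩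

-- the scan model of Source B's prefix-max loop
def pvScanMax (c : Option Int) : List Int → List Int
  | [] => []
  | e :: rest =>
    let c' : Int := match c with
      | none => e
      | some cc => if e > cc then e else cc
    c' :: pvScanMax (some c') rest

theorem pvFoldl_maxends (l : List (Int × Int)) :
    ∀ (c : Option Int) (acc : List Int),
    (l.foldl
      (fun (st : Option Int × List Int) p =>
        let cur : Int := match st.1 with
          | none => p.2
          | some c => if p.2 > c then p.2 else c
        (some cur, st.2 ++ [cur]))
      (c, acc)).2 = acc ++ pvScanMax c (l.map (fun p => p.2)) := by
  induction l with
  | nil => simp [pvScanMax]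
  | cons p rest ih =>
    intro c acc
    simp only [List.foldl_cons, List.map_cons, pvScanMax]
    rw [ih]
    simp

theorem pvScanMax_getD_ge (t : Int) :
    ∀ (l : List Int) (c : Option Int) (j : Nat), j < l.length →
    (t ≤ (pvScanMax c l).getD j 0 ↔
      (∃ i : Nat, i ≤ j ∧ i < l.length ∧ t ≤ l.getD i 0) ∨
      (∃ cc, c = some cc ∧ t ≤ cc)) := by
  intro l
  induction l with
  | nil => intro c j hj; simp at hj
  | cons e rest ih =>
    intro c j hj
    cases j with
    | zero =>
      cases c with
      | none =>
        simp only [pvScanMax, List.getD]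
        constructor
        · intro h; exact Or.inl ⟨0, le_refl _, by simp, by simpa using h⟩
        · rintro (⟨i, hi0, _, hle⟩ | ⟨cc, hcc, _⟩)
          · interval_cases i; simpa using hle
          · exact absurd hcc (by simp)
      | some cc =>
        simp only [pvScanMax, List.getD]
        by_cases hec : e > cc <;> simp only [hec, if_true, if_false] <;> constructor
        · intro h; exact Or.inl ⟨0, le_refl _, by simp, by simpa using h⟩
        · rintro (⟨i, hi0, _, hle⟩ | ⟨cc', hcc', hle'⟩)
          · interval_cases i; simpa using hle
          · simp only [Option.some.injEq] at hcc'; subst hcc'; simp; omega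
        · intro h; exact Or.inr ⟨cc, rfl, h⟩
        · rintro (⟨i, hi0, _, hle⟩ | ⟨cc', hcc', hle'⟩)
          · interval_cases i; simp at hle ⊢; omega
          · simp only [Option.some.injEq] at hcc'; subst hcc'; simpa using hle'
    | succ j' =>
      have hj' : j' < rest.length := by simpa using hj
      cases c with
      | none =>
        have key := ih (some e) j' hj'
        simp only [pvScanMax]
        simp only [List.getD_cons_succ, List.length_cons]
        rw [key]
        constructor
        · rintro (⟨i, hij, hil, hle⟩ | ⟨cc', hcc', hle'⟩)
          · exact Or.inl ⟨i + 1, by omega, by omega, by simpa using hle⟩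
          · simp only [Option.some.injEq] at hcc'; subst hcc'
            exact Or.inl ⟨0, by omega, by omega, by simpa using hle'⟩
        · rintro (⟨i, hij, hil, hle⟩ | ⟨cc', hcc', hle'⟩)
          · cases i with
            | zero => exact Or.inr ⟨e, rfl, by simpa using hle⟩
            | succ i' => exact Or.inl ⟨i', by omega, by omega, by simpa using hle⟩
          · exact absurd hcc' (by simp)
      | some cc =>
        have key := ih (some (if e > cc then e else cc)) j' hj'
        simp only [pvScanMax]
        simp only [List.getD_cons_succ, List.length_cons]
        rw [key]
        constructor
        · rintro (⟨i, hij, hil, hle⟩ | ⟨cc', hcc', hle'⟩)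
          · exact Or.inl ⟨i + 1, by omega, by omega, by simpa using hle⟩
          · simp only [Option.some.injEq] at hcc'; subst hcc'
            by_cases hec : e > cc
            · simp only [hec, if_true] at hle'
              exact Or.inl ⟨0, by omega, by omega, by simpa using hle'⟩
            · simp only [hec, if_false] at hle'
              exact Or.inr ⟨cc, rfl, hle'⟩
        · rintro (⟨i, hij, hil, hle⟩ | ⟨cc', hcc', hle'⟩)
          · cases i with
            | zero =>
              refine Or.inr ⟨_, rfl, ?_⟩
              simp only [List.getD_cons_zero] at hle
              by_cases hec : e > cc <;> simp [hec] <;> omega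
            | succ i' => exact Or.inl ⟨i', by omega, by omega, by simpa using hle⟩
          · simp only [Option.some.injEq] at hcc'; subst hcc'
            refine Or.inr ⟨_, rfl, ?_⟩
            by_cases hec : e > cc <;> simp [hec] <;> omega

-- the two per-vision tests agree
theorem pvTest_eq (audio_frames : List (Int × Int)) (v : Int × Int) :
    pvAnyIntersect v audio_frames =
      (let audio_sorted := PySem.List.sorted audio_frames (fun p => p.1)
       let starts := audio_sorted.map (fun p => p.1)
       let maxends := pvScanMax none (audio_sorted.map (fun p => p.2))
       let k := pvCountLE starts v.2 0 starts.length
       k > 0 && decide (v.1 ≤ maxends.getD (k - 1) 0)) := by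
  dsimp only
  set as := PySem.List.sorted audio_frames (fun p => p.1) with has
  set starts := as.map (fun p => p.1) with hst
  set ends := as.map (fun p => p.2) with hen
  set k := pvCountLE starts v.2 0 starts.length with hk
  have hpw : starts.Pairwise (· ≤ ·) := by
    rw [hst]
    exact (List.pairwise_map).mpr (PySem.List.sorted_pairwise audio_frames (fun p => p.1))
  have hmono : ∀ i j : Nat, i ≤ j → j < starts.length → starts.getD i 0 ≤ starts.getD j 0 := by
    intro i j hij hj
    rcases Nat.eq_or_lt_of_le hij with rfl | hlt
    · exact le_refl _
    · rw [List.getD_eq_getElem _ _ (by omega), List.getD_eq_getElem _ _ hj]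
      exact List.pairwise_iff_getElem.mp hpw i j (by omega) hj hlt
  have hspec := pvCountLE_spec starts v.2 hmono starts.length 0 starts.length
    (by omega) (by omega) (le_refl _) (by omega) (fun j hj hjl => absurd hjl (by omega))
  obtain ⟨-, hkle, hklt, hkgt⟩ := hspec
  rw [← hk] at hkle hklt hkgt
  have hlen : starts.length = as.length := by rw [hst]; exact List.length_map ..
  have hlene : ends.length = as.length := by rw [hen]; exact List.length_map ..
  rw [Bool.eq_iff_iff, pvAnyIntersect_eq_true_iff]
  simp only [Bool.and_eq_true, decide_eq_true_eq]
  constructor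
  · rintro ⟨a, ha, h1, h2⟩
    have ha' : a ∈ as := by rw [has]; exact (PySem.List.mem_sorted ..).mpr ha
    obtain ⟨i, hi, hai⟩ := List.mem_iff_getElem.mp ha'
    have hsi : starts.getD i 0 = a.1 := by
      rw [hst, List.getD_eq_getElem _ _ (by simpa using hi)]
      simp [hai]
    have hei : ends.getD i 0 = a.2 := by
      rw [hen, List.getD_eq_getElem _ _ (by simpa using hi)]
      simp [hai]
    have hik : i < k := by
      by_contra hik
      have hgt := hkgt i (by omega) (by omega)
      rw [hsi] at hgt
      omega
    refine ⟨by omega, ?_⟩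
    have hscan := pvScanMax_getD_ge v.1 ends none (k - 1) (by omega)
    rw [hscan]
    exact Or.inl ⟨i, by omega, by omega, by rw [hei]; exact h1⟩
  · rintro ⟨hk0, hmax⟩
    have hscan := pvScanMax_getD_ge v.1 ends none (k - 1) (by omega)
    rw [hscan] at hmax
    rcases hmax with ⟨i, hik1, hil, hle⟩ | ⟨cc, hcc, -⟩
    · have hi : i < as.length := by omega
      refine ⟨as[i], ?_, ?_, ?_⟩
      · exact (PySem.List.mem_sorted ..).mp (List.getElem_mem hi)
      · have : ends.getD i 0 = as[i].2 := by
          rw [hen, List.getD_eq_getElem _ _ (by simpa using hi)]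
          simp
        omega
      · have hlt := hklt i (by omega)
        have : starts.getD i 0 = as[i].1 := by
          rw [hst, List.getD_eq_getElem _ _ (by simpa using hi)]
          simp
        omega
    · exact absurd hcc (by simp)

-- ===== VERDICT (by name: the statement is the Claim_ definition above) =====
theorem process_vision_scenes_spec : Claim_equal_process_vision_scenes := by
  intro vs afs _
  unfold Spec_process_vision_scenes process_vision_scenes process_vision_scenes_alt
  simp only []
  rw [pvFoldl_maxends]
  simp only [List.nil_append]
  congr 1
  funext acc v
  rw [pvTest_eq afs v]
  rfl
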